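-- pv_equiv track=rewrite | github.com/jbsam2/algo_problem | kakao/19년 겨울 인턴/징검다리.py | check
-- ===== SOURCE A (Python) =====
-- def check(stones,k,n):
--     temp=0
--     for stone in stones:
--         if stone<=n:
--             temp+=1
--         else:
--             temp=0
--         if temp>=k:
--             return False
--     return True
-- ===== SOURCE B (Python) =====
-- def check(stones, k, n):
--     if not stones:
--         return True
--     runs = [0]
--     for s in stones:
--         if s <= n:
--             runs[-1] += 1
--         else:
--             runs.append(0)
--     return max(runs) < k
-- ===== Notes on version B (the rewrite author's own statement) =====
-- stated objective: alternative
-- what changed: Instead of A's running counter with an early return inside the loop, B first collects the lengths of all maximal runs of stones <= n into a list and then returns whether their maximum is below k.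
import Mathlib
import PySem

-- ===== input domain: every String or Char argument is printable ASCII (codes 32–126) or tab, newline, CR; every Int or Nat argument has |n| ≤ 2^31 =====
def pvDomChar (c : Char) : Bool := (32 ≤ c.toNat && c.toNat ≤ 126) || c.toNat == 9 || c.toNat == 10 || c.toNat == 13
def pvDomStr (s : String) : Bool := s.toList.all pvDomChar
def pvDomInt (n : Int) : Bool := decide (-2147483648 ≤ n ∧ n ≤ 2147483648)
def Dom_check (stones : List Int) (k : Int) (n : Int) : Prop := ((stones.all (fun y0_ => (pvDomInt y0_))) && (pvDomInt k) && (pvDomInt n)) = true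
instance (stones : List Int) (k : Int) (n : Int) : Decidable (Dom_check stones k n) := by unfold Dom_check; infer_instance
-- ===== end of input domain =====

-- B replaces A's early-exit running counter by first collecting all run lengths and then
-- comparing their maximum with k (objective: alternative decomposition, same cost).

-- ===== PORT A =====
-- the for-loop of A with early 'return False'; temp is the running counter
def checkLoop (k n : Int) : List Int → Int → Bool
  | [], _ => true
  | stone :: rest, temp =>
    let temp' := if stone ≤ n then temp + 1 else 0
    if k ≤ temp' then false else checkLoop k n rest temp'

def check (stones : List Int) (k : Int) (n : Int) : Bool :=
  checkLoop k n stones 0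

-- ===== PORT B =====
-- B's loop building the list 'runs'; the accumulator is kept reversed so that
-- Python's 'runs[-1] += 1' is an update of the head and 'runs.append(0)' a cons.
def runsLoop (n : Int) : List Int → List Int → List Int
  | [], acc => acc
  | s :: rest, acc =>
    if s ≤ n then runsLoop n rest ((acc.headD 0 + 1) :: acc.tail)
    else runsLoop n rest (0 :: acc)

def check_alt (stones : List Int) (k : Int) (n : Int) : Bool :=
  if stones = [] then true
  else
    let runs := (runsLoop n stones [0]).reverse
    match PySem.List.max? runs (fun x => x) with
    | some m => decide (m < k)
    | none => true    -- unreachable: runs is nonempty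

-- ===== PRECONDITION & SPEC =====
def Spec_check (stones : List Int) (k : Int) (n : Int) (out : Bool) : Prop := out = check_alt stones k n
instance (stones : List Int) (k : Int) (n : Int) (out : Bool) : Decidable (Spec_check stones k n out) := by unfold Spec_check; infer_instance

-- ===== CLAIM (what is proved, stated in full; the proofs are below) =====
def Claim_equal_check : Prop := ∀ (stones : List Int) (k : Int) (n : Int), Dom_check stones k n → Spec_check stones k n (check stones k n)

-- ===== LEMMAS AND PROOFS =====

-- tail elements of the accumulator survive the whole loop
theorem runsLoop_mem_tail (n : Int) (l : List Int) : ∀ (c : Int) (cs : List Int) (x : Int),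
    x ∈ cs → x ∈ runsLoop n l (c :: cs) := by
  induction l with
  | nil => intro c cs x hx; simpa [runsLoop] using (List.mem_cons_of_mem _ hx)
  | cons s rest ih =>
    intro c cs x hx
    by_cases h : s ≤ n
    · simpa [runsLoop, h] using ih (c + 1) cs x hx
    · exact by simpa [runsLoop, h] using ih 0 (c :: cs) x (List.mem_cons_of_mem _ hx)

-- the current head reaches the result, possibly grown
theorem runsLoop_head_le (n : Int) (l : List Int) : ∀ (c : Int) (cs : List Int),
    ∃ r ∈ runsLoop n l (c :: cs), c ≤ r := by
  induction l with
  | nil => intro c cs; exact ⟨c, by simp [runsLoop], le_refl c⟩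
  | cons s rest ih =>
    intro c cs
    by_cases h : s ≤ n
    · obtain ⟨r, hr, hcr⟩ := ih (c + 1) cs
      exact ⟨r, by simpa [runsLoop, h] using hr, by omega⟩
    · exact ⟨c, by simpa [runsLoop, h] using runsLoop_mem_tail n rest 0 (c :: cs) c (List.mem_cons_self), le_refl c⟩

-- the loop invariant connecting A's early-exit counter with B's collected runs
theorem loop_invariant (k n : Int) (l : List Int) : ∀ (cur : Int) (rs : List Int),
    cur < k → (∀ r ∈ rs, r < k) →
    (checkLoop k n l cur = true ↔ ∀ r ∈ runsLoop n l (cur :: rs), r < k) := by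
  induction l with
  | nil =>
    intro cur rs hcur hrs
    simp only [checkLoop, runsLoop, true_iff]
    intro r hr
    rcases List.mem_cons.mp hr with h | h
    · omega
    · exact hrs r h
  | cons s rest ih =>
    intro cur rs hcur hrs
    by_cases hs : s ≤ n
    · by_cases hk : k ≤ cur + 1
      · simp only [checkLoop, hs, if_true, if_pos hk]
        obtain ⟨r, hr, hcr⟩ := runsLoop_head_le n rest (cur + 1) rs
        constructor
        · intro h; exact absurd h (by simp)
        · intro h; exact absurd (h r (by simpa [runsLoop, hs] using hr)) (by omega)
      · have := ih (cur + 1) rs (by omega) hrs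
        simpa [checkLoop, runsLoop, hs, hk] using this
    · by_cases hk : k ≤ 0
      · simp only [checkLoop, hs, if_false, if_pos hk]
        obtain ⟨r, hr, hcr⟩ := runsLoop_head_le n rest 0 (cur :: rs)
        constructor
        · intro h; exact absurd h (by simp)
        · intro h; exact absurd (h r (by simpa [runsLoop, hs] using hr)) (by omega)
      · have := ih 0 (cur :: rs) (by omega)
          (by intro r hr; rcases List.mem_cons.mp hr with h | h
              · omega
              · exact hrs r h)
        simpa [checkLoop, runsLoop, hs, hk] using this

-- B returns true iff every collected run length is < k (for nonempty stones)
theorem check_alt_char (stones : List Int) (k n : Int) (hne : stones ≠ []) :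
    (check_alt stones k n = true ↔ ∀ r ∈ runsLoop n stones [0], r < k) := by
  have hex : ∃ r ∈ runsLoop n stones [0], (0 : Int) ≤ r := runsLoop_head_le n stones 0 []
  obtain ⟨r0, hr0, _⟩ := hex
  have hne' : (runsLoop n stones [0]).reverse ≠ [] := by
    intro h
    have : runsLoop n stones [0] = [] := by simpa using congrArg List.reverse h
    simp [this] at hr0
  obtain ⟨m, hm⟩ := Option.ne_none_iff_exists'.mp
    (by rw [Ne, PySem.List.max?_eq_none_iff]; exact hne' :
      PySem.List.max? (runsLoop n stones [0]).reverse (fun x => x) ≠ none)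
  have hmem : m ∈ (runsLoop n stones [0]).reverse := PySem.List.max?_mem hm
  have hmax : ∀ y ∈ (runsLoop n stones [0]).reverse, y ≤ m := by
    intro y hy; exact PySem.List.max?_isMax hm y hy
  simp only [check_alt, if_neg hne, hm]
  constructor
  · intro h r hr
    have : r ≤ m := hmax r (List.mem_reverse.mpr hr)
    have : m < k := of_decide_eq_true h
    omega
  · intro h
    exact decide_eq_true (h m (List.mem_reverse.mp hmem))

-- ===== VERDICT (by name: the statement is the Claim_ definition above) =====
theorem check_spec : Claim_equal_check := by
  intro stones k n _
  unfold Spec_check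
  rcases stones with _ | ⟨s, rest⟩
  · simp [check, checkLoop, check_alt]
  · apply Bool.eq_iff_iff.mpr
    rw [check_alt_char (s :: rest) k n (by simp)]
    by_cases hk : 0 < k
    · exact loop_invariant k n (s :: rest) 0 [] hk (by simp)
    · constructor
      · intro h
        exfalso
        revert h
        by_cases hs : s ≤ n <;> simp [check, checkLoop, hs] <;> omega
      · intro h
        obtain ⟨r, hr, hcr⟩ := runsLoop_head_le n (s :: rest) 0 []
        exact absurd (h r hr) (by omega)
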